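-- pv_equiv track=rewrite | github.com/illumos/illumos-gate | usr/src/tools/scripts/git-pbchk.py | iswinreserved
-- ===== SOURCE A (Python) =====
-- def iswinreserved(name):
--     reserved = [
--         'con', 'prn', 'aux', 'nul',
--         'com1', 'com2', 'com3', 'com4', 'com5',
--         'com6', 'com7', 'com8', 'com9', 'com0',
--         'lpt1', 'lpt2', 'lpt3', 'lpt4', 'lpt5',
--         'lpt6', 'lpt7', 'lpt8', 'lpt9', 'lpt0' ]
--     l = name.lower()
--     for r in reserved:
--         if l == r or l.startswith(r+"."):
--             return True
--     return False
-- ===== SOURCE B (Python) =====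
-- def iswinreserved(name):
--     l = name.lower()
--     dot = l.find('.')
--     base = l if dot < 0 else l[:dot]
--     return (base in ('con', 'prn', 'aux', 'nul')
--             or (len(base) == 4 and base[:3] in ('com', 'lpt')
--                 and base[3] in '0123456789'))
-- ===== Notes on version B (the rewrite author's own statement) =====
-- stated objective: alternative
-- what changed: B extracts the base name before the first dot once and classifies it by a structural pattern (one of the four 3-letter names, or a 'com'/'lpt' prefix followed by one digit) instead of A's scan over the 24-entry reserved list with an equality and a startswith test per entry.
import Mathlib
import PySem

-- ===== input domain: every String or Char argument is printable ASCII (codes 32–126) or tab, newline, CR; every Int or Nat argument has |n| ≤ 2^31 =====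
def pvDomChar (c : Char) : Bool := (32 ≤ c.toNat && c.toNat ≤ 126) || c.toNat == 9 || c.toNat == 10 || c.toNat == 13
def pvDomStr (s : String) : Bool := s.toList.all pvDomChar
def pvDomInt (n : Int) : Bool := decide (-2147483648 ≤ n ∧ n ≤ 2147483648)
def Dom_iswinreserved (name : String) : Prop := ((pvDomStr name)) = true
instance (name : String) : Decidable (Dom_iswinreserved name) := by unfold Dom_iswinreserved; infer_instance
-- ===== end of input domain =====

-- B classifies the base name before the first dot by a structural pattern
-- (four literal names, or 'com'/'lpt' plus one digit) instead of A's
-- per-entry equality/startswith scan over the 24-name list (alternative).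

-- ===== PORT A =====
-- A's local list of reserved names.
def pvReservedA : List String :=
  ["con", "prn", "aux", "nul",
   "com1", "com2", "com3", "com4", "com5",
   "com6", "com7", "com8", "com9", "com0",
   "lpt1", "lpt2", "lpt3", "lpt4", "lpt5",
   "lpt6", "lpt7", "lpt8", "lpt9", "lpt0"]

-- for r in reserved: if l == r or l.startswith(r+"."): return True  /  return False
def iswinreserved (name : String) : Bool :=
  let l := PySem.Str.lower name
  pvReservedA.any (fun r => l == r || PySem.Str.startswith l (r ++ "."))

-- ===== PORT B =====
-- l = name.lower(); dot = l.find('.'); base = l if dot < 0 else l[:dot]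
-- base in ('con','prn','aux','nul') or (len(base)==4 and base[:3] in ('com','lpt') and base[3] in '0123456789')
def iswinreserved_alt (name : String) : Bool :=
  let l := PySem.Str.lower name
  let dot := PySem.Str.find l "."
  let base := if dot < 0 then l else PySem.Str.slice l none (some dot)
  ["con", "prn", "aux", "nul"].contains base
  || (PySem.Str.len base == 4
      && ["com", "lpt"].contains (PySem.Str.slice base none (some 3))
      && (match PySem.Str.pyGet? base 3 with
          | some c => PySem.Str.isIn (String.ofList [c]) "0123456789"
          | none => false))

-- ===== PRECONDITION & SPEC =====
def Spec_iswinreserved (name : String) (out : Bool) : Prop := out = iswinreserved_alt name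
instance (name : String) (out : Bool) : Decidable (Spec_iswinreserved name out) := by unfold Spec_iswinreserved; infer_instance

-- ===== CLAIM (what is proved, stated in full; the proofs are below) =====
def Claim_equal_iswinreserved : Prop := ∀ (name : String), Dom_iswinreserved name → Spec_iswinreserved name (iswinreserved name)

-- ===== LEMMAS AND PROOFS =====

-- the char-level base name computed by B
def pvBase (cs : List Char) : List Char :=
  if PySem.Chars.find cs ['.'] < 0 then cs
  else PySem.List.slice cs none (some (PySem.Chars.find cs ['.']))

theorem pv_infix_of_mem {c : Char} {l : List Char} (h : c ∈ l) : [c] <:+: l := by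
  obtain ⟨s, t, rfl⟩ := List.append_of_mem h
  exact ⟨s, t, by simp⟩

-- core: A's per-name test (equality or startswith r+'.') iff the base name equals r
theorem pv_key (cs rs : List Char) (hr : '.' ∉ rs) :
    (cs = rs ∨ (rs ++ ['.']) <+: cs) ↔ pvBase cs = rs := by
  by_cases hneg : PySem.Chars.find cs ['.'] < 0
  · have hm1 : PySem.Chars.find cs ['.'] = -1 := by
      have := PySem.Chars.neg_one_le_find cs ['.']
      omega
    have hnd : ¬ ['.'] <:+: cs := (PySem.Chars.find_eq_neg_one_iff cs ['.']).mp hm1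
    have hdot : '.' ∉ cs := fun h => hnd (pv_infix_of_mem h)
    simp only [pvBase, if_pos hneg]
    constructor
    · rintro (rfl | h)
      · rfl
      · exact absurd (h.sublist.subset (by simp)) hdot
    · exact fun h => Or.inl h
  · have h0 : 0 ≤ PySem.Chars.find cs ['.'] := by omega
    have hinf : ['.'] <:+: cs := (PySem.Chars.find_nonneg_iff cs ['.']).mp h0
    set n := PySem.Chars.find cs ['.'] with hn
    have hne : PySem.Chars.findFrom cs ['.'] 0 none ≠ -1 := by
      rw [PySem.Chars.findFrom_zero]; omega
    have hspec := PySem.Chars.findFrom_natCast_spec cs ['.'] 0 (by omega) hne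
    simp only [Nat.cast_zero, PySem.Chars.findFrom_zero, ← hn] at hspec
    obtain ⟨-, hpre, hmin⟩ := hspec
    obtain ⟨t, ht⟩ : ∃ t, cs.drop n.toNat = '.' :: t := by
      obtain ⟨w, hw⟩ := hpre
      exact ⟨w, hw.symm⟩
    have hdotcs : '.' ∈ cs := by
      have : '.' ∈ cs.drop n.toNat := by rw [ht]; simp
      exact List.mem_of_mem_drop this
    simp only [pvBase, if_neg hneg, ← hn, PySem.List.slice_to cs h0]
    constructor
    · rintro (rfl | h)
      · exact absurd hdotcs hr
      · have hlen : rs.length = n.toNat := by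
          rcases lt_trichotomy rs.length n.toNat with hlt | heq | hgt
          · exfalso
            apply hmin rs.length (by omega) hlt
            obtain ⟨w, hw⟩ := h
            rw [← hw, List.append_assoc, List.drop_append_of_le_length le_rfl]
            simp
          · exact heq
          · exfalso
            obtain ⟨w, hw⟩ := h
            have hdrop : cs.drop n.toNat = rs.drop n.toNat ++ (['.'] ++ w) := by
              rw [← hw, List.append_assoc, List.drop_append_of_le_length (by omega)]
            rw [ht] at hdrop
            have hrs : rs.drop n.toNat = rs[n.toNat] :: rs.drop (n.toNat + 1) :=
              List.drop_eq_getElem_cons hgt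
            rw [hrs, List.cons_append] at hdrop
            injection hdrop with h1 _
            exact hr (by rw [h1]; exact List.getElem_mem hgt)
        obtain ⟨w, hw⟩ := h
        rw [← hw, List.append_assoc, ← hlen, List.take_left]
    · rintro rfl
      refine Or.inr ⟨t, ?_⟩
      calc cs.take n.toNat ++ ['.'] ++ t
          = cs.take n.toNat ++ ('.' :: t) := by simp
        _ = cs.take n.toNat ++ cs.drop n.toNat := by rw [ht]
        _ = cs := List.take_append_drop _ _

-- every reserved name is dot-free
theorem pv_reserved_nodot : ∀ r ∈ pvReservedA, '.' ∉ r.toList := by decide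

-- membership of a string in the 24-name list iff B's pattern holds of it
theorem pv_pattern (s : String) :
    pvReservedA.contains s =
    (["con", "prn", "aux", "nul"].contains s
     || (PySem.Str.len s == 4
         && ["com", "lpt"].contains (PySem.Str.slice s none (some 3))
         && (match PySem.Str.pyGet? s 3 with
             | some c => PySem.Str.isIn (String.ofList [c]) "0123456789"
             | none => false))) := by
  rw [Bool.eq_iff_iff, List.contains_iff_mem, Bool.or_eq_true, List.contains_iff_mem]
  constructor
  · intro h
    fin_cases h <;> decide
  · rintro (h4 | hpat)
    · fin_cases h4 <;> decide
    · rw [Bool.and_eq_true, Bool.and_eq_true] at hpat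
      obtain ⟨⟨hlen, htake⟩, hd⟩ := hpat
      have hlen4 : s.toList.length = 4 := by
        have h2 := beq_iff_eq.mp hlen
        simp at h2 ⊢
        omega
      obtain ⟨a, b, c, d, hlist⟩ : ∃ a b c d, s.toList = [a, b, c, d] := by
        rcases h : s.toList with _ | ⟨a, _ | ⟨b, _ | ⟨c, _ | ⟨d, _ | ⟨e, t⟩⟩⟩⟩⟩ <;>
          first
            | exact ⟨_, _, _, _, rfl⟩
            | exact ⟨_, _, _, _, h⟩
            | (exfalso; simp [h] at hlen4)
      have htake3 : (PySem.Str.slice s none (some 3)).toList = [a, b, c] := by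
        simp [PySem.Str.toList_slice, PySem.List.slice_to, hlist]
      have hget : PySem.Str.pyGet? s 3 = some d := by
        simp [hlist, PySem.List.pyGet?, PySem.List.pyIdx?]
      rw [hget] at hd
      have hd' : PySem.Str.isIn (String.ofList [d]) "0123456789" = true := hd
      rw [PySem.Str.isIn_eq] at hd'
      have hdmem : d ∈ ['0','1','2','3','4','5','6','7','8','9'] := by
        have hm : d ∈ "0123456789".toList :=
          ((PySem.Chars.isIn_iff_infix _ _).mp (by simpa using hd')).sublist.subset (by simp)
        rw [(by decide : "0123456789".toList = ['0','1','2','3','4','5','6','7','8','9'])] at hm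
        exact hm
      have habc : [a, b, c] = "com".toList ∨ [a, b, c] = "lpt".toList := by
        have hm := List.contains_iff_mem.mp htake
        simp only [List.mem_cons, List.not_mem_nil, or_false] at hm
        rcases hm with h | h
        · left; rw [← htake3, h]
        · right; rw [← htake3, h]
      have hs : s = String.ofList s.toList := (String.ofList_toList).symm
      rcases habc with habc | habc
      · have hlist2 : s.toList = "com".toList ++ [d] := by
          rw [hlist, show [a, b, c, d] = [a, b, c] ++ [d] from rfl, habc]
        fin_cases hdmem <;> (rw [hs, hlist2]; decide)
      · have hlist2 : s.toList = "lpt".toList ++ [d] := by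
          rw [hlist, show [a, b, c, d] = [a, b, c] ++ [d] from rfl, habc]
        fin_cases hdmem <;> (rw [hs, hlist2]; decide)

-- A equals 'base ∈ reserved'
theorem pv_A_eq_contains (name : String) :
    iswinreserved name =
      pvReservedA.contains
        (let l := PySem.Str.lower name
         if PySem.Str.find l "." < 0 then l
         else PySem.Str.slice l none (some (PySem.Str.find l "."))) := by
  unfold iswinreserved
  rw [Bool.eq_iff_iff, List.any_eq_true, List.contains_iff_mem]
  set l := PySem.Str.lower name with hl
  constructor
  · rintro ⟨r, hrmem, hr⟩
    have hnd := pv_reserved_nodot r hrmem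
    have := (pv_key l.toList r.toList hnd).mp ?_
    · have hbase : (if PySem.Str.find l "." < 0 then l
            else PySem.Str.slice l none (some (PySem.Str.find l "."))) = r := by
        apply String.toList_inj.mp
        rw [← this]
        unfold pvBase
        by_cases h : PySem.Chars.find l.toList ['.'] < 0
        · simp [h]
        · simp [h, PySem.Str.toList_slice]
      rw [hbase]; exact hrmem
    · rcases Bool.or_eq_true_iff.mp hr with h | h
      · exact Or.inl (by simpa [String.toList_inj] using (beq_iff_eq.mp h))
      · refine Or.inr ?_
        have := (PySem.Chars.startswith_iff (l.toList) ((r ++ ".").toList)).mp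
          (by simpa [PySem.Str.startswith_eq] using h)
        simpa using this
  · intro hmem
    set base := (if PySem.Str.find l "." < 0 then l
        else PySem.Str.slice l none (some (PySem.Str.find l "."))) with hbase
    refine ⟨base, hmem, ?_⟩
    have hnd := pv_reserved_nodot base hmem
    have hb : pvBase l.toList = base.toList := by
      unfold pvBase
      rw [hbase]
      by_cases h : PySem.Chars.find l.toList ['.'] < 0
      · simp [h]
      · simp [h, PySem.Str.toList_slice]
    have := (pv_key l.toList base.toList hnd).mpr hb
    rcases this with h | h
    · exact Bool.or_eq_true_iff.mpr (Or.inl (beq_iff_eq.mpr (String.toList_inj.mp h)))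
    · refine Bool.or_eq_true_iff.mpr (Or.inr ?_)
      rw [PySem.Str.startswith_eq]
      exact (PySem.Chars.startswith_iff _ _).mpr (by simpa using h)

-- ===== VERDICT (by name: the statement is the Claim_ definition above) =====
theorem iswinreserved_spec : Claim_equal_iswinreserved := by
  intro name _
  unfold Spec_iswinreserved iswinreserved_alt
  rw [pv_A_eq_contains name, pv_pattern]
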